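-- pv_equiv track=rewrite | github.com/mohitdudi/Python-String | custom_rstrip.py | cusrst
-- ===== SOURCE A (Python) =====
-- def cusrst(st):
--     i=len(st)-1
--     out=""
--     while i>=0:
--         x=st[i]
--         if ord(x)==32:
--             i-=1
--             continue
--         else:
--             while(i>=0):
--                 x=st[i]
--                 out=out+x
--                 i-=1
--             break
--         i-=1
--     out=out[::-1]
--     return out
-- ===== SOURCE B (Python) =====
-- def cusrst(st):
--     out = []
--     pending = 0
--     for ch in st:
--         if ch == ' ':
--             pending += 1
--         else:
--             out.append(' ' * pending)
--             pending = 0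
--             out.append(ch)
--     return ''.join(out)
-- ===== Notes on version B (the rewrite author's own statement) =====
-- stated objective: simpler
-- what changed: Replaced A's backward scan (find last non-space from the end, then copy the prefix reversed and reverse it again) with a single forward pass that buffers a pending-space count and flushes it before each non-space, discarding trailing spaces at the end.
import Mathlib
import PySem

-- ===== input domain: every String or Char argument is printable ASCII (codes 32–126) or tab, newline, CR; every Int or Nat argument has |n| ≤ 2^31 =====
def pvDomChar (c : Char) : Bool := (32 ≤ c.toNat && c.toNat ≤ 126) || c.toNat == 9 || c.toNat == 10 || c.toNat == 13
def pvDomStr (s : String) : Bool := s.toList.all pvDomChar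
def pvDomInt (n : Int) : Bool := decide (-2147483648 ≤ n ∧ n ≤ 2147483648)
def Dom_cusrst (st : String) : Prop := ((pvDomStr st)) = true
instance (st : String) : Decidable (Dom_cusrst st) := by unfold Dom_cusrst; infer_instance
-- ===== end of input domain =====

-- B replaces A's backward scan-and-double-reverse with a single forward pass
-- keeping a pending-space counter (objective: simpler).

-- ===== PORT A =====
-- A's inner while: once a non-space is found at index i, append st[i], st[i-1], …, st[0] to out.
-- We walk the character list from the end, i.e. over st.toList.reverse, which visits exactly
-- st[i] for i = len-1 … 0 in A's order.
def cusrstInner (out : List Char) (rl : List Char) : List Char :=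
  match rl with
  | [] => out
  | x :: rest => cusrstInner (out ++ [x]) rest   -- out = out + x; i -= 1

-- A's outer while: skip characters with ord 32, then run the inner copy loop and break.
def cusrstOuter (out : List Char) (rl : List Char) : List Char :=
  match rl with
  | [] => out
  | x :: rest => if x.toNat == 32 then cusrstOuter out rest else cusrstInner out (x :: rest)

def cusrst (st : String) : String :=
  -- out built back-to-front, then out = out[::-1]
  String.mk ((cusrstOuter [] st.toList.reverse).reverse)

-- ===== PORT B =====
-- one forward pass: (out, pending) state, flush pending spaces before each non-space
def cusrstStep (s : List Char × Nat) (c : Char) : List Char × Nat :=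
  if c = ' ' then (s.1, s.2 + 1)
  else (s.1 ++ List.replicate s.2 ' ' ++ [c], 0)

def cusrst_alt (st : String) : String :=
  String.mk (st.toList.foldl cusrstStep ([], 0)).1

-- ===== PRECONDITION & SPEC =====
def Spec_cusrst (st : String) (out : String) : Prop := out = cusrst_alt st
instance (st : String) (out : String) : Decidable (Spec_cusrst st out) := by unfold Spec_cusrst; infer_instance

-- ===== CLAIM (what is proved, stated in full; the proofs are below) =====
def Claim_equal_cusrst : Prop := ∀ (st : String), Dom_cusrst st → Spec_cusrst st (cusrst st)

-- ===== LEMMAS AND PROOFS =====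

-- reference right-strip, by simple structural recursion from the front
def rstripRef : List Char → List Char
  | [] => []
  | c :: t =>
    let r := rstripRef t
    if r = [] ∧ c = ' ' then [] else c :: r

theorem cusrstInner_eq (out rl : List Char) : cusrstInner out rl = out ++ rl := by
  induction rl generalizing out with
  | nil => simp [cusrstInner]
  | cons x rest ih => simp [cusrstInner, ih]

theorem rstripRef_append_space (l : List Char) :
    rstripRef (l ++ [' ']) = rstripRef l := by
  induction l with
  | nil => simp [rstripRef]
  | cons c t ih => simp [rstripRef, ih]

theorem rstripRef_append_nonspace (l : List Char) (c : Char) (hc : c ≠ ' ') :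
    rstripRef (l ++ [c]) = l ++ [c] := by
  induction l with
  | nil => simp [rstripRef, hc]
  | cons d t ih => simp [rstripRef, ih]

-- A's outer loop on the reversed list computes rstripRef, reversed
theorem char_toNat_eq_32 (x : Char) (hx : x ≠ ' ') : (x.toNat == 32) = false := by
  rw [beq_eq_false_iff_ne]
  intro h
  apply hx
  apply Char.ext
  apply UInt32.toNat_inj.mp
  exact h

theorem cusrstOuter_eq (rl : List Char) :
    cusrstOuter [] rl = (rstripRef rl.reverse).reverse := by
  induction rl with
  | nil => simp [cusrstOuter, rstripRef]
  | cons x rest ih =>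
    by_cases hx : x = ' '
    · subst hx
      rw [List.reverse_cons, rstripRef_append_space]
      simpa [cusrstOuter] using ih
    · rw [List.reverse_cons, rstripRef_append_nonspace rest.reverse x hx]
      simp [cusrstOuter, char_toNat_eq_32 x hx, cusrstInner_eq]

-- B's fold invariant
theorem foldl_cusrstStep (l out : List Char) (p : Nat) :
    (l.foldl cusrstStep (out, p)).1 =
      if rstripRef l = [] then out else out ++ List.replicate p ' ' ++ rstripRef l := by
  induction l generalizing out p with
  | nil => simp [rstripRef]
  | cons c t ih =>
    rw [List.foldl_cons]
    by_cases hc : c = ' '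
    · subst hc
      have hs : cusrstStep (out, p) ' ' = (out, p + 1) := by simp [cusrstStep]
      rw [hs, ih]
      by_cases ht : rstripRef t = []
      · simp [rstripRef, ht]
      · have hr : rstripRef (' ' :: t) = ' ' :: rstripRef t := by simp [rstripRef, ht]
        rw [hr, if_neg ht, if_neg (by simp), List.replicate_succ']
        simp
    · have hs : cusrstStep (out, p) c = (out ++ List.replicate p ' ' ++ [c], 0) := by
        simp [cusrstStep, hc]
      have hr : rstripRef (c :: t) = c :: rstripRef t := by simp [rstripRef, hc]
      rw [hs, ih, hr, if_neg (List.cons_ne_nil c (rstripRef t))]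
      by_cases ht : rstripRef t = []
      · simp [ht]
      · simp [ht]

-- ===== VERDICT (by name: the statement is the Claim_ definition above) =====
theorem cusrst_spec : Claim_equal_cusrst := by
  intro st _
  show cusrst st = cusrst_alt st
  unfold cusrst cusrst_alt
  rw [cusrstOuter_eq, List.reverse_reverse, foldl_cusrstStep]
  by_cases h : rstripRef st.toList = [] <;> simp [h]
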